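-- pv_equiv track=rewrite | github.com/Belingood/my-codewars-solutions | 6-kyu/make_chocolates.py | make_chocolates
-- ===== SOURCE A (Python) =====
-- def make_chocolates(small: int, big: int, goal: int) -> int:
--     """
--     :big_count: The maximum number of big chocolate bars possible
--     :big_count_weight: The weight of the big_count
--     :weight_for_small: The weight that the small chocolate bars should fill
--     :count_for_small: The number of small chocolate bars that fit in weight_for_small
--     :selected_total_weight: The final weight with the maximum possible number of
--     big chocolates and the addition of small ones
--     """
--
--     small_weight: int = 2
--     big_weight: int = 5
--
--     for i in range(2):
--         big_count: int = max(0, min(big, goal // big_weight) - i)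
--         big_count_weight: int = big_count * big_weight
--         weight_for_small: int = goal - big_count_weight
--         count_for_small: int = weight_for_small // small_weight
--         selected_total_weight: int = big_count_weight + min(small, count_for_small) * small_weight
--
--         if selected_total_weight == goal:
--             return count_for_small
--
--     return -1
-- ===== SOURCE B (Python) =====
-- def make_chocolates(small: int, big: int, goal: int) -> int:
--     b = max(0, min(big, goal // 5))
--     while b >= 0:
--         rem = goal - 5 * b
--         if rem % 2 == 0 and rem // 2 <= small:
--             return rem // 2
--         b -= 1
--     return -1
-- ===== Notes on version B (the rewrite author's own statement) =====
-- stated objective: simpler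
-- what changed: Replaces A's two-probe parity trick (try the top big-bar count and the one below, checking that reconstructed total weight equals goal) with a plain descending greedy scan over big-bar counts that returns the first b whose remainder is even and fits in small bars.
import Mathlib
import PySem

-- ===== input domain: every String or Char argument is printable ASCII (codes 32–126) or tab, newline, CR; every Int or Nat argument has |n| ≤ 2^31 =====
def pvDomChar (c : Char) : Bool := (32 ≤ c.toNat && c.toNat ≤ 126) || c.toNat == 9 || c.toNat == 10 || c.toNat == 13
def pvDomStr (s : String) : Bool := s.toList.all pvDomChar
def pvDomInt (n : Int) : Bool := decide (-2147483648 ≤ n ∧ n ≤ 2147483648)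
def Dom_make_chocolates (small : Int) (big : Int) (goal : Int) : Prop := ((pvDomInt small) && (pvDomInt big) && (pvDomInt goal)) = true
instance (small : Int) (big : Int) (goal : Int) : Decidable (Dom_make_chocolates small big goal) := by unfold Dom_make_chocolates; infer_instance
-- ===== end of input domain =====

-- B replaces A's O(1) two-probe parity trick with a plain descending scan over big-bar counts (simpler, not faster).

-- ===== PORT A =====
-- one probe = one iteration of A's `for i in range(2)` body (returns some count on `return`, none otherwise)
def pvProbeA (small : Int) (big : Int) (goal : Int) (i : Int) : Option Int :=
  let big_count : Int := max 0 (min big (PySem.Int.floordiv goal 5) - i)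
  let big_count_weight : Int := big_count * 5
  let weight_for_small : Int := goal - big_count_weight
  let count_for_small : Int := PySem.Int.floordiv weight_for_small 2
  let selected_total_weight : Int := big_count_weight + min small count_for_small * 2
  if selected_total_weight = goal then some count_for_small else none

def make_chocolates (small : Int) (big : Int) (goal : Int) : Int :=
  match (PySem.List.pyRange 0 2 1).foldl
      (fun acc i =>
        match acc with
        | some v => some v
        | none => pvProbeA small big goal i) none with
  | some v => v
  | none => -1

-- ===== PORT B =====
-- the `while b >= 0` loop of Source B, counting the Int b down as a Nat (b starts at max 0 … ≥ 0)
def pvScanB (small : Int) (goal : Int) : Nat → Int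
  | 0 =>
    let rem : Int := goal - 5 * 0
    if PySem.Int.mod rem 2 = 0 ∧ PySem.Int.floordiv rem 2 ≤ small then
      PySem.Int.floordiv rem 2
    else -1
  | Nat.succ b =>
    let rem : Int := goal - 5 * ((b : Int) + 1)
    if PySem.Int.mod rem 2 = 0 ∧ PySem.Int.floordiv rem 2 ≤ small then
      PySem.Int.floordiv rem 2
    else pvScanB small goal b

def make_chocolates_alt (small : Int) (big : Int) (goal : Int) : Int :=
  pvScanB small goal (max 0 (min big (PySem.Int.floordiv goal 5))).toNat

-- ===== PRECONDITION & SPEC =====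
def Spec_make_chocolates (small : Int) (big : Int) (goal : Int) (out : Int) : Prop := out = make_chocolates_alt small big goal
instance (small : Int) (big : Int) (goal : Int) (out : Int) : Decidable (Spec_make_chocolates small big goal out) := by unfold Spec_make_chocolates; infer_instance

-- ===== CLAIM (what is proved, stated in full; the proofs are below) =====
def Claim_equal_make_chocolates : Prop := ∀ (small : Int) (big : Int) (goal : Int), Dom_make_chocolates small big goal → Spec_make_chocolates small big goal (make_chocolates small big goal)

-- ===== LEMMAS AND PROOFS =====

-- the loop/probe success condition at a candidate big-bar count b
def pvCond (small : Int) (goal : Int) (b : Int) : Prop :=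
  PySem.Int.mod (goal - 5 * b) 2 = 0 ∧ PySem.Int.floordiv (goal - 5 * b) 2 ≤ small

lemma pv_decomp (w : Int) :
    PySem.Int.floordiv w 2 * 2 + PySem.Int.mod w 2 = w ∧
      0 ≤ PySem.Int.mod w 2 ∧ PySem.Int.mod w 2 < 2 := by
  rw [PySem.Int.floordiv_eq_ediv_of_pos (by norm_num), PySem.Int.mod_eq_emod_of_pos (by norm_num)]
  refine ⟨?_, ?_, ?_⟩ <;> omega

lemma pv_cond_iff (small goal b : Int) :
    pvCond small goal b ↔ ∃ k, goal - 5 * b = 2 * k ∧ k ≤ small := by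
  obtain ⟨h1, h2, h3⟩ := pv_decomp (goal - 5 * b)
  unfold pvCond
  constructor
  · rintro ⟨hm, hf⟩
    exact ⟨PySem.Int.floordiv (goal - 5 * b) 2, by omega, hf⟩
  · rintro ⟨k, hk, hks⟩
    constructor <;> omega

lemma pv_cond_mono (small goal b b' : Int) (h : pvCond small goal b) (hle : b ≤ b')
    (hdvd : 2 ∣ (b' - b)) : pvCond small goal b' := by
  rw [pv_cond_iff] at h ⊢
  obtain ⟨k, hk, hks⟩ := h
  obtain ⟨t, ht⟩ := hdvd
  exact ⟨k - 5 * t, by omega, by omega⟩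

lemma pv_fd2 (k : Int) : PySem.Int.floordiv (2 * k) 2 = k := by
  rw [PySem.Int.floordiv_eq_ediv_of_pos (by norm_num)]
  omega

lemma pv_probe_hit (small big goal i : Int)
    (h : pvCond small goal (max 0 (min big (PySem.Int.floordiv goal 5) - i))) :
    pvProbeA small big goal i =
      some (PySem.Int.floordiv (goal - 5 * (max 0 (min big (PySem.Int.floordiv goal 5) - i))) 2) := by
  unfold pvProbeA
  set bc := max 0 (min big (PySem.Int.floordiv goal 5) - i) with hbc
  rw [pv_cond_iff] at h
  obtain ⟨k, hk, hks⟩ := h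
  have h5 : goal - bc * 5 = 2 * k := by omega
  have h5' : goal - 5 * bc = 2 * k := by omega
  simp only [h5, h5', pv_fd2]
  rw [if_pos (by omega)]

lemma pv_probe_miss (small big goal i : Int)
    (h : ¬ pvCond small goal (max 0 (min big (PySem.Int.floordiv goal 5) - i))) :
    pvProbeA small big goal i = none := by
  unfold pvProbeA
  set bc := max 0 (min big (PySem.Int.floordiv goal 5) - i) with hbc
  rw [if_neg]
  intro hsel
  apply h
  obtain ⟨h1, h2, h3⟩ := pv_decomp (goal - bc * 5)
  have hcomm : goal - 5 * bc = goal - bc * 5 := by ring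
  unfold pvCond
  rw [hcomm]
  constructor <;> omega

lemma pv_scan_hit (small goal : Int) (n : Nat) (h : pvCond small goal (n : Int)) :
    pvScanB small goal n = PySem.Int.floordiv (goal - 5 * (n : Int)) 2 := by
  cases n with
  | zero => rw [pvScanB, if_pos (by exact_mod_cast h)]; norm_num
  | succ m =>
    rw [pvScanB]
    unfold pvCond at h
    push_cast at h ⊢
    rw [if_pos h]

lemma pv_scan_skip (small goal : Int) (n : Nat) (h : ¬ pvCond small goal ((n : Int) + 1)) :
    pvScanB small goal (n + 1) = pvScanB small goal n := by
  rw [pvScanB]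
  unfold pvCond at h
  rw [if_neg h]

lemma pv_scan_none (small goal : Int) (n : Nat)
    (h : ∀ m : Nat, m ≤ n → ¬ pvCond small goal (m : Int)) : pvScanB small goal n = -1 := by
  induction n with
  | zero => rw [pvScanB, if_neg (by exact_mod_cast h 0 le_rfl)]
  | succ m ih =>
    have h' : ¬ pvCond small goal ((m : Int) + 1) := by
      have heq : ((m + 1 : Nat) : Int) = (m : Int) + 1 := by push_cast; ring
      rw [← heq]; exact h (m + 1) le_rfl
    rw [pv_scan_skip small goal m h']
    exact ih fun k hk => h k (Nat.le_succ_of_le hk)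

-- ===== VERDICT (by name: the statement is the Claim_ definition above) =====
theorem make_chocolates_spec : Claim_equal_make_chocolates := by
  intro small big goal _
  unfold Spec_make_chocolates make_chocolates make_chocolates_alt
  have hrange : PySem.List.pyRange 0 2 1 = [0, 1] := by decide
  rw [hrange]
  simp only [List.foldl]
  set q := PySem.Int.floordiv goal 5 with hq
  have hz : min big q - 0 = min big q := by ring
  have hb0nn : (0 : Int) ≤ max 0 (min big q) := le_max_left _ _
  have hcast : ((max 0 (min big q)).toNat : Int) = max 0 (min big q) := Int.toNat_of_nonneg hb0nn
  by_cases h0 : pvCond small goal (max 0 (min big q))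
  · rw [pv_probe_hit small big goal 0 (by rwa [hz])]
    rw [pv_scan_hit small goal _ (by rwa [hcast]), hcast, hz]
  · by_cases h1 : pvCond small goal (max 0 (min big q - 1))
    · rcases le_or_gt (min big q) 0 with hm | hm
      · exact absurd (by rwa [(by omega : max 0 (min big q - 1) = max 0 (min big q))] at h1) h0
      · -- min big q ≥ 1 : A takes the second probe, B skips the top b and hits at b-1
        rw [pv_probe_miss small big goal 0 (by rwa [hz]),
            pv_probe_hit small big goal 1 h1]
        have hn : (max 0 (min big q)).toNat = (max 0 (min big q) - 1).toNat + 1 := by omega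
        have hcast1 : ((max 0 (min big q) - 1).toNat : Int) = max 0 (min big q) - 1 := by omega
        have hb1 : max 0 (min big q) - 1 = max 0 (min big q - 1) := by omega
        rw [hn, pv_scan_skip small goal _ (by rwa [hcast1, (by omega : max 0 (min big q) - 1 + 1 = max 0 (min big q))]),
            pv_scan_hit small goal _ (by rwa [hcast1, hb1]), hcast1, hb1]
    · rw [pv_probe_miss small big goal 0 (by rwa [hz]),
          pv_probe_miss small big goal 1 h1]
      rw [pv_scan_none small goal _ ?_]
      intro m hm hcm
      have hmle : (m : Int) ≤ max 0 (min big q) := by omega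
      have hsplit : 2 ∣ (max 0 (min big q) - (m : Int)) ∨
          ((m : Int) ≤ max 0 (min big q) - 1 ∧ 2 ∣ (max 0 (min big q) - 1 - (m : Int))) := by omega
      rcases hsplit with hd | ⟨hle1, hd⟩
      · exact h0 (pv_cond_mono small goal _ _ hcm hmle hd)
      · have hb1 : max 0 (min big q) - 1 = max 0 (min big q - 1) := by omega
        exact h1 (hb1 ▸ pv_cond_mono small goal _ _ hcm hle1 hd)
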